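-- pv_equiv track=rewrite | github.com/thao1923/is212-g3t8 | is103/Project1 (v1.0)/q3/p1q3_utility.py | get_unique_followers2
-- ===== SOURCE A (Python) =====
-- def get_unique_followers2 (advertisers, f):
--   users_who_get_advert = []
--
--   for a in advertisers:
--     users_who_get_advert += f[a]
--   users_who_get_advert = set(users_who_get_advert) # remove duplicates. put in set
--
--   # remove original advertisers
--   for a in advertisers:
--     users_who_get_advert.discard(a)
--
--   return sorted(list(users_who_get_advert))  # return a sorted list of users_who_get_advert
-- ===== SOURCE B (Python) =====
-- def get_unique_followers2(advertisers, f):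
--     combined = []
--     for a in advertisers:
--         combined.extend(f[a])
--     combined.sort()
--     ads = set(advertisers)
--     out = []
--     prev = None
--     for x in combined:
--         if prev is None or x != prev:
--             prev = x
--             if x not in ads:
--                 out.append(x)
--     return out
-- ===== Notes on version B (the rewrite author's own statement) =====
-- stated objective: alternative
-- what changed: Replaces A's hash-set deduplication plus a discard loop with sort-then-scan: the concatenated follower lists are sorted once and walked linearly, emitting an element only if it differs from the previous one and is not in set(advertisers).
import Mathlib
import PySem

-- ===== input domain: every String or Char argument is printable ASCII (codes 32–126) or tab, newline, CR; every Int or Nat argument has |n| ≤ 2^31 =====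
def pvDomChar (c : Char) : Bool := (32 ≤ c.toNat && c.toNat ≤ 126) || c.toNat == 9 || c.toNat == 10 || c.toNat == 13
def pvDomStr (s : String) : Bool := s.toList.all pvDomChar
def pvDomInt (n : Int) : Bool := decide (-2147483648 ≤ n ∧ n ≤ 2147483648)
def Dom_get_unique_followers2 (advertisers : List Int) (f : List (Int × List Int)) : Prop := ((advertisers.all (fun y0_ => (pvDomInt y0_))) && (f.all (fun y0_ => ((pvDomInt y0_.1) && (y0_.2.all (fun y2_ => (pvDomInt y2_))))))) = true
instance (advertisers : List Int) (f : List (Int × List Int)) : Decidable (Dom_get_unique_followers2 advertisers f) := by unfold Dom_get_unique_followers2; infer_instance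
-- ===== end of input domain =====

-- B replaces A's hash-set deduplication and discard loop by sort-then-scan: sort the
-- concatenation once and emit each element that differs from the previous one and is
-- not an advertiser (objective: alternative decomposition, same result).

-- ===== PORT A =====
-- users_who_get_advert = []; for a in advertisers: users_who_get_advert += f[a]
-- (f[a] raises KeyError for a missing key — excluded by Pre_; under Pre_, getD is exact)
def get_unique_followers2 (advertisers : List Int) (f : List (Int × List Int)) : List Int :=
  let users := advertisers.foldl (fun acc a => acc ++ (PySem.Dict.mk f).getD a []) []
  let s := PySem.Set.ofList users                                -- set(users_who_get_advert)
  let s := advertisers.foldl (fun s a => PySem.Set.discard s a) s -- for a in advertisers: s.discard(a)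
  PySem.List.sorted s (fun x => x)                               -- sorted(list(s))

-- ===== PORT B =====
-- one scan step of Source B's loop: skip x when it equals the previous element, otherwise
-- remember it and append it unless it is an advertiser
def bStep (ads : PySem.Set Int) (st : List Int × Option Int) (x : Int) : List Int × Option Int :=
  if st.2 ≠ some x then
    ((if PySem.Set.contains ads x then st.1 else st.1 ++ [x]), some x)
  else st

def get_unique_followers2_alt (advertisers : List Int) (f : List (Int × List Int)) : List Int :=
  let combined := advertisers.foldl (fun acc a => acc ++ (PySem.Dict.mk f).getD a []) []
  let sortedC := PySem.List.sorted combined (fun x => x)         -- combined.sort()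
  let ads := PySem.Set.ofList advertisers                        -- set(advertisers)
  (sortedC.foldl (bStep ads) ([], none)).1

-- ===== PRECONDITION & SPEC =====
-- Pre_ excludes exactly the inputs on which A's 'f[a]' raises KeyError (an advertiser
-- that is not a key of f); A returns normally everywhere else.
def Pre_get_unique_followers2 (advertisers : List Int) (f : List (Int × List Int)) : Prop :=
  ∀ a ∈ advertisers, (PySem.Dict.mk f).contains a = true
instance (advertisers : List Int) (f : List (Int × List Int)) : Decidable (Pre_get_unique_followers2 advertisers f) := by unfold Pre_get_unique_followers2; infer_instance

def pvWitness_get_unique_followers2 : List Int × (List (Int × List Int)) := ([0], [(0, [1, 2, 1])])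

def Spec_get_unique_followers2 (advertisers : List Int) (f : List (Int × List Int)) (out : List Int) : Prop := out = get_unique_followers2_alt advertisers f
instance (advertisers : List Int) (f : List (Int × List Int)) (out : List Int) : Decidable (Spec_get_unique_followers2 advertisers f out) := by unfold Spec_get_unique_followers2; infer_instance

-- ===== CLAIM (what is proved, stated in full; the proofs are below) =====
def Claim_equal_get_unique_followers2 : Prop := ∀ (advertisers : List Int) (f : List (Int × List Int)), Dom_get_unique_followers2 advertisers f → Pre_get_unique_followers2 advertisers f → Spec_get_unique_followers2 advertisers f (get_unique_followers2 advertisers f)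

-- ===== LEMMAS AND PROOFS =====

-- A's discard loop over any set: still nodup, membership is "in s and not an advertiser"
theorem discard_foldl_spec (adl : List Int) : ∀ (s : PySem.Set Int), s.Nodup →
    (adl.foldl (fun s a => PySem.Set.discard s a) s).Nodup ∧
    ∀ z, z ∈ adl.foldl (fun s a => PySem.Set.discard s a) s ↔ z ∈ s ∧ z ∉ adl := by
  induction adl with
  | nil => intro s hs; simpa using hs
  | cons a t ih =>
    intro s hs
    obtain ⟨h1, h2⟩ := ih (PySem.Set.discard s a) (PySem.Set.nodup_discard s a hs)
    simp only [List.foldl_cons]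
    refine ⟨h1, fun z => ?_⟩
    rw [h2 z, PySem.Set.mem_discard s a z]
    simp only [List.mem_cons]
    constructor
    · rintro ⟨⟨hz, hne⟩, hnt⟩; exact ⟨hz, by tauto⟩
    · rintro ⟨hz, hn⟩; exact ⟨⟨hz, by tauto⟩, by tauto⟩

-- B's scan over a ≤-sorted list: the output is strictly increasing and contains exactly
-- the non-advertiser elements of the list, apart from the one remembered in prev
theorem scan_spec (ads : PySem.Set Int) : ∀ (S out : List Int) (prev : Option Int),
    S.Pairwise (· ≤ ·) →
    out.Pairwise (· < ·) →
    (prev = none → out = []) →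
    (∀ y ∈ out, ∀ p, prev = some p → y ≤ p) →
    (∀ x ∈ S, ∀ p, prev = some p → p ≤ x) →
    (S.foldl (bStep ads) (out, prev)).1.Pairwise (· < ·) ∧
    ∀ z, z ∈ (S.foldl (bStep ads) (out, prev)).1 ↔
      z ∈ out ∨ (z ∈ S ∧ PySem.Set.contains ads z = false ∧ prev ≠ some z) := by
  intro S
  induction S with
  | nil => intro out prev _ hout _ _ _; simpa using hout
  | cons x rest ih =>
    intro out prev hS hout hnone hle hlo
    have hSt : rest.Pairwise (· ≤ ·) := hS.tail
    have hxle : ∀ y ∈ rest, x ≤ y := fun y hy => List.rel_of_pairwise_cons hS hy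
    by_cases hpx : prev = some x
    · -- skipped: equals the previous element
      subst hpx
      simp only [List.foldl_cons, bStep, ne_eq, not_true_eq_false, reduceIte]
      obtain ⟨h1, h2⟩ := ih out (some x) hSt hout (by simp) hle
        (fun y hy p hp => by cases hp; exact hxle y hy)
      refine ⟨h1, fun z => ?_⟩
      rw [h2 z]
      simp only [List.mem_cons, ne_eq, Option.some.injEq]
      constructor
      · rintro (h | ⟨h, ha, hne⟩); · exact Or.inl h
        · exact Or.inr ⟨Or.inr h, ha, hne⟩
      · rintro (h | ⟨(rfl | h), ha, hne⟩)
        · exact Or.inl h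
        · exact absurd rfl hne
        · exact Or.inr ⟨h, ha, hne⟩
    · -- processed: new previous element x; every element of out is < x
      have houtlt : ∀ y ∈ out, y < x := by
        intro y hy
        cases prev with
        | none => simp [hnone rfl] at hy
        | some p =>
          have h1 : y ≤ p := hle y hy p rfl
          have h2 : p ≤ x := hlo x (List.mem_cons_self) p rfl
          have h3 : p ≠ x := fun h => hpx (by rw [h])
          omega
      have hstep : List.foldl (bStep ads) (out, prev) (x :: rest) =
          List.foldl (bStep ads)
            ((if PySem.Set.contains ads x then out else out ++ [x]), some x) rest := by
        simp [bStep, hpx]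
      rw [hstep]
      by_cases hads : PySem.Set.contains ads x = true
      · simp only [hads, if_pos]
        obtain ⟨h1, h2⟩ := ih out (some x) hSt hout (by simp)
          (fun y hy p hp => by cases hp; exact le_of_lt (houtlt y hy))
          (fun y hy p hp => by cases hp; exact hxle y hy)
        refine ⟨h1, fun z => ?_⟩
        rw [h2 z]
        simp only [List.mem_cons, ne_eq, Option.some.injEq]
        constructor
        · rintro (h | ⟨h, ha, hne⟩); · exact Or.inl h
          · refine Or.inr ⟨Or.inr h, ha, ?_⟩
            cases prev with
            | none => simp
            | some p =>
              have h2 : p ≤ x := hlo x (List.mem_cons_self) p rfl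
              have h3 : p ≠ x := fun h => hpx (by rw [h])
              have h4 : x ≤ z := hxle z h
              simp only [Option.some.injEq]; omega
        · rintro (h | ⟨(rfl | h), ha, hne⟩)
          · exact Or.inl h
          · rw [hads] at ha; simp at ha
          · refine Or.inr ⟨h, ha, fun hzx => ?_⟩
            rw [hzx] at hads; rw [hads] at ha; simp at ha
      · have hads' : PySem.Set.contains ads x = false := by simpa using hads
        simp only [hads', Bool.false_eq_true, reduceIte]
        have hout' : (out ++ [x]).Pairwise (· < ·) := by
          rw [List.pairwise_append]
          exact ⟨hout, List.pairwise_singleton _ _, by simpa using houtlt⟩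
        obtain ⟨h1, h2⟩ := ih (out ++ [x]) (some x) hSt hout' (by simp)
          (by intro y hy p hp; cases hp
              rcases List.mem_append.1 hy with h | h
              · exact le_of_lt (houtlt y h)
              · simp at h; omega)
          (fun y hy p hp => by cases hp; exact hxle y hy)
        refine ⟨h1, fun z => ?_⟩
        rw [h2 z]
        simp only [List.mem_append, List.mem_cons, List.not_mem_nil, or_false, ne_eq,
          Option.some.injEq]
        constructor
        · rintro ((h | rfl) | ⟨h, ha, hne⟩)
          · exact Or.inl h
          · refine Or.inr ⟨Or.inl rfl, hads', fun hp => hpx ?_⟩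
            cases prev with
            | none => cases hp
            | some p => simp_all
          · refine Or.inr ⟨Or.inr h, ha, ?_⟩
            cases prev with
            | none => simp
            | some p =>
              have hpl : p ≤ x := hlo x (List.mem_cons_self) p rfl
              have h3 : p ≠ x := fun h => hpx (by rw [h])
              have h4 : x ≤ z := hxle z h
              simp only [Option.some.injEq]; omega
        · rintro (h | ⟨(rfl | h), ha, hne⟩)
          · exact Or.inl (Or.inl h)
          · exact Or.inl (Or.inr rfl)
          · rcases eq_or_ne z x with rfl | hzx
            · exact Or.inl (Or.inr rfl)
            · exact Or.inr ⟨h, ha, fun hxz => hzx hxz.symm⟩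

-- ===== VERDICT (by name: the statement is the Claim_ definition above) =====
theorem get_unique_followers2_spec : Claim_equal_get_unique_followers2 := by
  intro advertisers f _ _
  unfold Spec_get_unique_followers2
  simp only [get_unique_followers2, get_unique_followers2_alt]
  set C := advertisers.foldl (fun acc a => acc ++ (PySem.Dict.mk f).getD a []) [] with hC
  set ads := PySem.Set.ofList advertisers with hads
  -- B side: characterise the scan over sorted C
  obtain ⟨hBp, hBm⟩ := scan_spec ads (PySem.List.sorted C (fun x => x)) [] none
    (PySem.List.sorted_pairwise C (fun x => x)) (by simp) (fun _ => rfl)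
    (by simp) (by simp)
  -- A side: characterise the discard loop
  obtain ⟨hAn, hAm⟩ := discard_foldl_spec advertisers (PySem.Set.ofList C)
    (PySem.Set.nodup_ofList C)
  -- the two lists are nodup with equal membership, and B's is strictly increasing
  refine PySem.List.sorted_eq_of_perm_of_pairwise_lt _ _ (fun x => x) ?_ hBp
  rw [List.perm_ext_iff_of_nodup (hBp.imp (fun h => ne_of_lt h)) hAn]
  intro z
  rw [hBm z, hAm z, PySem.Set.mem_ofList]
  simp only [List.not_mem_nil, false_or, ne_eq, reduceCtorEq, not_false_eq_true, and_true,
    PySem.List.mem_sorted]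
  constructor
  · rintro ⟨hz, ha⟩
    refine ⟨hz, fun hm => ?_⟩
    rw [hads] at ha
    simp only [PySem.Set.contains, List.contains_eq_mem] at ha
    exact absurd ((PySem.Set.mem_ofList advertisers z).2 hm) (by simpa using ha)
  · rintro ⟨hz, hm⟩
    refine ⟨hz, ?_⟩
    rw [hads]
    simp only [PySem.Set.contains, List.contains_eq_mem]
    simp [PySem.Set.mem_ofList, hm]
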